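-- pv_equiv track=rewrite | github.com/Sharks820/veilbreakers-gamedev-toolkit | Tools/mcp-toolkit/src/veilbreakers_mcp/blender_server.py | _derive_site_profile
-- ===== SOURCE A (Python) =====
-- def _derive_site_profile(location: dict, map_spec: dict) -> str:
--     """Infer a building site profile from freeform location and map briefs."""
--     parts = []
--     for source in (map_spec, location):
--         for key in ("layout_brief", "visual_brief", "style_brief", "description", "prompt", "brief", "theme"):
--             value = source.get(key)
--             if isinstance(value, str) and value.strip():
--                 parts.append(value.strip().lower())
--
--     combined = " ".join(parts)
--     tokens = set(combined.replace(",", " ").replace(".", " ").split())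
--
--     if tokens & {"harbor", "harbour", "port", "river", "canal", "dock", "docks", "waterfront", "coast", "coastal", "bay"}:
--         return "waterfront"
--     if tokens & {"cliff", "cliffside", "cliffs", "ridge", "terrace", "terraces", "terraced", "slope", "hillside", "mountain"}:
--         return "cliffside"
--     if tokens & {"fort", "fortified", "citadel", "garrison", "barracks", "keep"}:
--         return "fortified"
--     if tokens & {"abbey", "cathedral", "temple", "shrine", "monastery", "academy", "school"}:
--         return "monastery"
--     if tokens & {"forge", "smith", "workshop", "industrial"}:
--         return "forgeyard"
--     if tokens & {"market", "merchant", "trade", "bazaar", "guild"}: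
--         return "market"
--     return ""
-- ===== SOURCE B (Python) =====
-- _KEYWORD_RANK = {
--     "harbor": 0, "harbour": 0, "port": 0, "river": 0, "canal": 0, "dock": 0,
--     "docks": 0, "waterfront": 0, "coast": 0, "coastal": 0, "bay": 0,
--     "cliff": 1, "cliffside": 1, "cliffs": 1, "ridge": 1, "terrace": 1,
--     "terraces": 1, "terraced": 1, "slope": 1, "hillside": 1, "mountain": 1,
--     "fort": 2, "fortified": 2, "citadel": 2, "garrison": 2, "barracks": 2, "keep": 2,
--     "abbey": 3, "cathedral": 3, "temple": 3, "shrine": 3, "monastery": 3,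
--     "academy": 3, "school": 3,
--     "forge": 4, "smith": 4, "workshop": 4, "industrial": 4,
--     "market": 5, "merchant": 5, "trade": 5, "bazaar": 5, "guild": 5,
-- }
-- _PROFILES = ("waterfront", "cliffside", "fortified", "monastery", "forgeyard", "market")
--
--
-- def _derive_site_profile(location: dict, map_spec: dict) -> str:
--     """Infer a building site profile from freeform location and map briefs."""
--     best = 6
--     for source in (map_spec, location):
--         for key in ("layout_brief", "visual_brief", "style_brief", "description", "prompt", "brief", "theme"):
--             text = source.get(key)
--             if isinstance(text, str):
--                 for token in text.lower().replace(",", " ").replace(".", " ").split():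
--                     rank = _KEYWORD_RANK.get(token, 6)
--                     if rank < best:
--                         best = rank
--     return _PROFILES[best] if best < 6 else ""
-- ===== Notes on version B (the rewrite author's own statement) =====
-- stated objective: alternative
-- what changed: Instead of collecting stripped briefs into a list, joining them, tokenizing once and testing six keyword sets in priority order, B streams over each brief string individually, tokenizes it on the spot and keeps a running minimum priority rank via one flat keyword-to-rank table, returning the profile of the minimum rank.
import Mathlib
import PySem

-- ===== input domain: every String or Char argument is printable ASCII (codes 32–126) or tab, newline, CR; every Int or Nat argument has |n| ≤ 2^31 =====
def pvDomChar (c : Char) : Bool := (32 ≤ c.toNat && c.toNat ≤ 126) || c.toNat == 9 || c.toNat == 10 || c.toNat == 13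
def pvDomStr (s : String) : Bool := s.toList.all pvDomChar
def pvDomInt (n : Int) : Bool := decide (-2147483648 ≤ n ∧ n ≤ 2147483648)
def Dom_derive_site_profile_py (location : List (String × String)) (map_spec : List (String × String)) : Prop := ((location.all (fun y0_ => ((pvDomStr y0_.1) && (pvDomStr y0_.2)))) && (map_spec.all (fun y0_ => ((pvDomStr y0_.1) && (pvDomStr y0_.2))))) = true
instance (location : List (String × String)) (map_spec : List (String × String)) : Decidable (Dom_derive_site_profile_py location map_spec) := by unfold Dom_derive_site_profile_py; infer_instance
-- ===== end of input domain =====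

-- B streams over each brief string individually (no parts list / join / strip guard), keeping a
-- running minimum priority rank via one flat keyword→rank table (objective: alternative).


-- ===== PORT A =====
-- A's six keyword sets, its brief keys, and its parts-collection + join + replace + split pipeline
def pvKws0 : List String := ["harbor", "harbour", "port", "river", "canal", "dock", "docks", "waterfront", "coast", "coastal", "bay"]
def pvKws1 : List String := ["cliff", "cliffside", "cliffs", "ridge", "terrace", "terraces", "terraced", "slope", "hillside", "mountain"]
def pvKws2 : List String := ["fort", "fortified", "citadel", "garrison", "barracks", "keep"]
def pvKws3 : List String := ["abbey", "cathedral", "temple", "shrine", "monastery", "academy", "school"]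
def pvKws4 : List String := ["forge", "smith", "workshop", "industrial"]
def pvKws5 : List String := ["market", "merchant", "trade", "bazaar", "guild"]

def pvBriefKeysA : List String := ["layout_brief", "visual_brief", "style_brief", "description", "prompt", "brief", "theme"]

-- parts-collection loop + " ".join + replace + split(), exactly as A writes it
-- (the isinstance(value, str) test is vacuous here: every dict value is a String)
def derive_site_profile_py (location : List (String × String)) (map_spec : List (String × String)) : String :=
  let parts : List String :=
    ([map_spec, location]).foldl (fun parts source =>
      pvBriefKeysA.foldl (fun parts key =>
        match (PySem.Dict.ofList source).get? key with
        | some value =>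
            if PySem.Str.strip value ≠ "" then parts ++ [PySem.Str.lower (PySem.Str.strip value)]
            else parts
        | none => parts) parts) []
  let tokens : PySem.Set String := PySem.Set.ofList (PySem.Str.split₀ (PySem.Str.replace (PySem.Str.replace (PySem.Str.join " " parts) "," " ") "." " "))
  if PySem.Set.inter tokens pvKws0 ≠ [] then "waterfront"
  else if PySem.Set.inter tokens pvKws1 ≠ [] then "cliffside"
  else if PySem.Set.inter tokens pvKws2 ≠ [] then "fortified"
  else if PySem.Set.inter tokens pvKws3 ≠ [] then "monastery"
  else if PySem.Set.inter tokens pvKws4 ≠ [] then "forgeyard"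
  else if PySem.Set.inter tokens pvKws5 ≠ [] then "market"
  else ""

-- ===== PORT B =====
-- B's flat keyword→rank table (the dict literal in Source B), its profile tuple, and a streaming scan
def pvRankTbl : PySem.Dict String Int := PySem.Dict.ofList [
  ("harbor", 0), ("harbour", 0), ("port", 0), ("river", 0), ("canal", 0), ("dock", 0),
  ("docks", 0), ("waterfront", 0), ("coast", 0), ("coastal", 0), ("bay", 0),
  ("cliff", 1), ("cliffside", 1), ("cliffs", 1), ("ridge", 1), ("terrace", 1),
  ("terraces", 1), ("terraced", 1), ("slope", 1), ("hillside", 1), ("mountain", 1),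
  ("fort", 2), ("fortified", 2), ("citadel", 2), ("garrison", 2), ("barracks", 2), ("keep", 2),
  ("abbey", 3), ("cathedral", 3), ("temple", 3), ("shrine", 3), ("monastery", 3),
  ("academy", 3), ("school", 3),
  ("forge", 4), ("smith", 4), ("workshop", 4), ("industrial", 4),
  ("market", 5), ("merchant", 5), ("trade", 5), ("bazaar", 5), ("guild", 5)]

def pvProfiles : List String := ["waterfront", "cliffside", "fortified", "monastery", "forgeyard", "market"]

-- the inner token loop: for token in …: rank = get(token, 6); if rank < best: best = rank
def pvScanTokens (best : Int) (toks : List String) : Int :=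
  toks.foldl (fun b token =>
    let rank := pvRankTbl.getD token 6
    if rank < b then rank else b) best

def derive_site_profile_py_alt (location : List (String × String)) (map_spec : List (String × String)) : String :=
  let best : Int :=
    ([map_spec, location]).foldl (fun best source =>
      (["layout_brief", "visual_brief", "style_brief", "description", "prompt", "brief", "theme"] : List String).foldl (fun best key =>
        match (PySem.Dict.ofList source).get? key with
        | some text =>
            pvScanTokens best (PySem.Str.split₀ (PySem.Str.replace (PySem.Str.replace (PySem.Str.lower text) "," " ") "." " "))
        | none => best) best) 6
  if best < 6 then PySem.List.pyGetD pvProfiles best "" else ""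

-- ===== PRECONDITION & SPEC =====
def Spec_derive_site_profile_py (location : List (String × String)) (map_spec : List (String × String)) (out : String) : Prop := out = derive_site_profile_py_alt location map_spec
instance (location : List (String × String)) (map_spec : List (String × String)) (out : String) : Decidable (Spec_derive_site_profile_py location map_spec out) := by unfold Spec_derive_site_profile_py; infer_instance

-- ===== CLAIM (what is proved, stated in full; the proofs are below) =====
def Claim_equal_derive_site_profile_py : Prop := ∀ (location : List (String × String)) (map_spec : List (String × String)), Dom_derive_site_profile_py location map_spec → Spec_derive_site_profile_py location map_spec (derive_site_profile_py location map_spec)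

-- ===== LEMMAS AND PROOFS =====

-- the character substitution performed by the two single-character replaces
def pvF (c : Char) : Char := if c = ',' then ' ' else if c = '.' then ' ' else c

-- single-character replace is a map
lemma pv_replace_go_single (o n : Char) (l : List Char) : ∀ (fuel : Nat) (acc : List Char),
    l.length ≤ fuel →
    PySem.Chars.replace.go [o] [n] fuel l acc = acc.reverse ++ l.map (fun c => if c = o then n else c) := by
  induction l with
  | nil =>
    intro fuel acc _
    cases fuel <;> simp [PySem.Chars.replace.go]
  | cons c t ih =>
    intro fuel acc hle
    cases fuel with
    | zero => simp at hle
    | succ fuel =>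
      simp only [PySem.Chars.replace.go]
      by_cases hco : c = o
      · subst hco
        rw [if_pos (by simp [List.isPrefixOf])]
        have hd : List.drop [c].length (c :: t) = t := rfl
        simp only [List.length_cons] at hle
        rw [hd, ih fuel _ (by omega)]
        simp
      · rw [if_neg (by simp [List.isPrefixOf]; exact fun h => absurd h.symm hco)]
        simp only [List.length_cons] at hle
        rw [ih fuel _ (by omega)]
        simp [hco]

lemma pv_replace_single (o n : Char) (l : List Char) :
    PySem.Chars.replace l [o] [n] = l.map (fun c => if c = o then n else c) := by
  simp only [PySem.Chars.replace, List.isEmpty_cons]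
  exact pv_replace_go_single o n l l.length [] le_rfl

lemma pv_double_replace (l : List Char) :
    PySem.Chars.replace (PySem.Chars.replace l [','] [' ']) ['.'] [' '] = l.map pvF := by
  rw [pv_replace_single, pv_replace_single, List.map_map]
  refine List.map_congr_left (fun c _ => ?_)
  simp only [Function.comp, pvF]
  by_cases h1 : c = ',' <;> by_cases h2 : c = '.' <;> simp [h1, h2]

-- a structural reformulation of Chars.split₀.go
def pvW (pend : List Char) : List Char → List (List Char)
  | [] => if pend = [] then [] else [pend]
  | c :: rest =>
      if PySem.Chars.isspace c then (if pend = [] then [] else [pend]) ++ pvW [] rest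
      else pvW (pend ++ [c]) rest

lemma pv_go_eq_pvW (s : List Char) : ∀ (cur : List Char) (acc : List (List Char)),
    PySem.Chars.split₀.go s cur acc = acc.reverse ++ pvW cur.reverse s := by
  induction s with
  | nil =>
    intro cur acc
    by_cases h : cur = [] <;> simp [PySem.Chars.split₀.go, pvW, h]
  | cons c rest ih =>
    intro cur acc
    simp only [PySem.Chars.split₀.go, pvW]
    by_cases hs : PySem.Chars.isspace c
    · rw [if_pos hs, if_pos hs]
      by_cases h : cur = []
      · simp [h, ih]
      · rw [if_neg (by simp [h]), if_neg (by simp [h]), ih]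
        simp
    · rw [if_neg hs, if_neg hs, ih]
      simp

lemma pv_split₀_eq_pvW (s : List Char) : PySem.Chars.split₀ s = pvW [] s := by
  simpa using pv_go_eq_pvW s [] []

-- splitting distributes over a whitespace separator
lemma pv_pvW_append_ws (c : Char) (hc : PySem.Chars.isspace c = true) (a : List Char) :
    ∀ (pend b : List Char), pvW pend (a ++ c :: b) = pvW pend a ++ pvW [] b := by
  induction a with
  | nil =>
    intro pend b
    by_cases h : pend = [] <;> simp [pvW, hc, h]
  | cons x a' ih =>
    intro pend b
    simp only [List.cons_append, pvW]
    by_cases hx : PySem.Chars.isspace x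
    · simp only [if_pos hx, ih]
      by_cases h : pend = [] <;> simp [h]
    · simp only [if_neg hx, ih]

-- an all-whitespace list yields no token beyond the pending word
lemma pv_pvW_all_ws (ws : List Char) (h : ∀ x ∈ ws, PySem.Chars.isspace x = true) :
    ∀ pend, pvW pend ws = if pend = [] then [] else [pend] := by
  induction ws with
  | nil => intro pend; simp [pvW]
  | cons c ws' ih =>
    intro pend
    have hc : PySem.Chars.isspace c = true := h c (by simp)
    have h' : ∀ x ∈ ws', PySem.Chars.isspace x = true := fun x hx => h x (by simp [hx])
    simp [pvW, hc, ih h']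

lemma pv_pvW_ws_prefix (ws s : List Char) (h : ∀ x ∈ ws, PySem.Chars.isspace x = true) :
    pvW [] (ws ++ s) = pvW [] s := by
  induction ws with
  | nil => rfl
  | cons c ws' ih =>
    have hc : PySem.Chars.isspace c = true := h c (by simp)
    simp only [List.cons_append, pvW, if_pos hc, List.nil_append]
    exact ih (fun x hx => h x (by simp [hx]))

lemma pv_pvW_ws_suffix (s : List Char) : ∀ (ws : List Char), (∀ x ∈ ws, PySem.Chars.isspace x = true) →
    ∀ pend, pvW pend (s ++ ws) = pvW pend s := by
  induction s with
  | nil =>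
    intro ws h pend
    rw [List.nil_append, pv_pvW_all_ws ws h pend]
    by_cases hp : pend = [] <;> simp [pvW, hp]
  | cons c s' ih =>
    intro ws h pend
    simp only [List.cons_append, pvW]
    by_cases hc : PySem.Chars.isspace c
    · simp [hc, ih ws h]
    · simp [hc, ih ws h]

-- pvF and lowerChar fix whitespace characters
lemma pv_lowerChar_ws (c : Char) (h : PySem.Chars.isspace c = true) : PySem.Chars.lowerChar c = c := by
  have hu : PySem.Chars.isupper c = false := by
    simp only [PySem.Chars.isspace, Bool.or_eq_true, Bool.and_eq_true, decide_eq_true_eq] at h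
    simp only [PySem.Chars.isupper, Bool.and_eq_false_iff, decide_eq_false_iff_not,
      Char.le_def, UInt32.le_iff_toNat_le, Char.toNat] at *
    rw [show ('A').val.toNat = 65 from rfl, show ('Z').val.toNat = 90 from rfl]
    omega
  simp [PySem.Chars.lowerChar, hu]

lemma pv_g_ws (c : Char) (h : PySem.Chars.isspace c = true) : pvF (PySem.Chars.lowerChar c) = c := by
  rw [pv_lowerChar_ws c h]
  have h1 : c ≠ ',' := by intro he; rw [he] at h; simp [PySem.Chars.isspace] at h
  have h2 : c ≠ '.' := by intro he; rw [he] at h; simp [PySem.Chars.isspace] at h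
  simp [pvF, h1, h2]

-- tokens of one value: what B computes on it
def pvToks (l : List Char) : List (List Char) := pvW [] (l.map (fun c => pvF (PySem.Chars.lowerChar c)))

-- stripping a value does not change its tokens
lemma pv_toks_strip (l : List Char) : pvToks (PySem.Chars.strip l) = pvToks l := by
  unfold pvToks
  have hdecomp : l = l.takeWhile PySem.Chars.isspace ++ PySem.Chars.lstrip l := by
    simp [PySem.Chars.lstrip, List.takeWhile_append_dropWhile]
  have hdecomp2 : PySem.Chars.lstrip l =
      PySem.Chars.strip l ++ (List.takeWhile PySem.Chars.isspace (PySem.Chars.lstrip l).reverse).reverse := by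
    simp only [PySem.Chars.strip, PySem.Chars.rstrip]
    conv_lhs => rw [← List.reverse_reverse (PySem.Chars.lstrip l)]
    rw [← List.reverse_append, ← List.takeWhile_append_dropWhile
      (p := PySem.Chars.isspace) (l := (PySem.Chars.lstrip l).reverse)]
    simp
  have hws1 : ∀ x ∈ (l.takeWhile PySem.Chars.isspace).map (fun c => pvF (PySem.Chars.lowerChar c)),
      PySem.Chars.isspace x = true := by
    intro x hx
    rcases List.mem_map.mp hx with ⟨c, hc, rfl⟩
    have := List.mem_takeWhile_imp hc
    rw [pv_g_ws c this]; exact this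
  have hws2 : ∀ x ∈ ((List.takeWhile PySem.Chars.isspace (PySem.Chars.lstrip l).reverse).reverse).map
      (fun c => pvF (PySem.Chars.lowerChar c)), PySem.Chars.isspace x = true := by
    intro x hx
    rcases List.mem_map.mp hx with ⟨c, hc, rfl⟩
    have := List.mem_takeWhile_imp (List.mem_reverse.mp hc)
    rw [pv_g_ws c this]; exact this
  conv_rhs => rw [hdecomp, List.map_append, pv_pvW_ws_prefix _ _ hws1, hdecomp2]
  rw [List.map_append, pv_pvW_ws_suffix _ _ hws2]

-- joining parts with " " and splitting gives the concatenation of the per-part tokens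
lemma pv_toks_join (ps : List (List Char)) :
    pvW [] ((PySem.Chars.join [' '] ps).map pvF) = ps.flatMap (fun p => pvW [] (p.map pvF)) := by
  induction ps with
  | nil => simp [PySem.Chars.join, List.intercalate, pvW]
  | cons p ps' ih =>
    cases ps' with
    | nil => simp [PySem.Chars.join, List.intercalate]
    | cons q rest =>
      have hj : PySem.Chars.join [' '] (p :: q :: rest) = p ++ ' ' :: PySem.Chars.join [' '] (q :: rest) := by
        simp [PySem.Chars.join, List.intercalate]
      rw [hj, List.map_append]
      have : (' ' :: PySem.Chars.join [' '] (q :: rest)).map pvF =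
          ' ' :: (PySem.Chars.join [' '] (q :: rest)).map pvF := by simp [pvF]
      rw [this, pv_pvW_append_ws ' ' (by decide) _ [] _, ih]
      simp

-- an all-whitespace value contributes no tokens
lemma pv_toks_all_ws (l : List Char) (h : PySem.Chars.strip l = []) : pvToks l = [] := by
  rw [← pv_toks_strip, h]
  rfl

-- generic fold / flatMap helpers
lemma pv_foldl_congr {α β : Type} (l : List α) (f g : β → α → β) (b : β)
    (h : ∀ (b : β) (x : α), x ∈ l → f b x = g b x) : l.foldl f b = l.foldl g b := by
  induction l generalizing b with
  | nil => rfl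
  | cons x xs ih =>
    rw [List.foldl_cons, List.foldl_cons, h b x (by simp)]
    exact ih _ (fun b y hy => h b y (by simp [hy]))

lemma pv_flatMap_flatMap {α β γ : Type} (l : List α) (g : α → List β) (h : β → List γ) :
    (l.flatMap g).flatMap h = l.flatMap (fun a => (g a).flatMap h) := by
  induction l with
  | nil => rfl
  | cons x xs ih => simp [List.flatMap_cons, List.flatMap_append, ih]

lemma pv_flatMap_congr {α β : Type} (l : List α) (f g : α → List β)
    (h : ∀ x ∈ l, f x = g x) : l.flatMap f = l.flatMap g := by
  induction l with
  | nil => rfl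
  | cons x xs ih =>
    rw [List.flatMap_cons, List.flatMap_cons, h x (by simp), ih (fun y hy => h y (by simp [hy]))]

-- A's parts foldl as an explicit flatMap
def pvPartOf (source : List (String × String)) (key : String) : List String :=
  match (PySem.Dict.ofList source).get? key with
  | some value =>
      if PySem.Str.strip value ≠ "" then [PySem.Str.lower (PySem.Str.strip value)] else []
  | none => []

lemma pv_parts_flatMap (location map_spec : List (String × String)) :
    ([map_spec, location]).foldl (fun parts source =>
      pvBriefKeysA.foldl (fun parts key =>
        match (PySem.Dict.ofList source).get? key with
        | some value =>
            if PySem.Str.strip value ≠ "" then parts ++ [PySem.Str.lower (PySem.Str.strip value)]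
            else parts
        | none => parts) parts) [] =
    ([map_spec, location]).flatMap (fun source => pvBriefKeysA.flatMap (pvPartOf source)) := by
  have hinner : ∀ (source : List (String × String)) (acc : List String),
      pvBriefKeysA.foldl (fun parts key =>
        match (PySem.Dict.ofList source).get? key with
        | some value =>
            if PySem.Str.strip value ≠ "" then parts ++ [PySem.Str.lower (PySem.Str.strip value)]
            else parts
        | none => parts) acc = acc ++ pvBriefKeysA.flatMap (pvPartOf source) := by
    intro source acc
    rw [← PySem.List.foldl_append_eq_flatMap (pvPartOf source) pvBriefKeysA acc]
    refine pv_foldl_congr _ _ _ _ (fun parts key _ => ?_)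
    unfold pvPartOf
    cases (PySem.Dict.ofList source).get? key with
    | none => simp
    | some value => by_cases h : PySem.Str.strip value ≠ "" <;> simp [h]
  rw [List.foldl_cons, List.foldl_cons, List.foldl_nil, hinner, hinner,
    List.flatMap_cons, List.flatMap_cons, List.flatMap_nil, List.append_nil, List.nil_append]

-- B's nested foldl as a fold over the concatenation of all per-value token lists
def pvValToks (source : List (String × String)) (key : String) : List String :=
  match (PySem.Dict.ofList source).get? key with
  | some text =>
      PySem.Str.split₀ (PySem.Str.replace (PySem.Str.replace (PySem.Str.lower text) "," " ") "." " ")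
  | none => []

lemma pv_scan_append (a b : List String) (init : Int) :
    pvScanTokens init (a ++ b) = pvScanTokens (pvScanTokens init a) b := by
  simp [pvScanTokens, List.foldl_append]

lemma pv_best_flatMap (location map_spec : List (String × String)) :
    ([map_spec, location]).foldl (fun best source =>
      (["layout_brief", "visual_brief", "style_brief", "description", "prompt", "brief", "theme"] : List String).foldl (fun best key =>
        match (PySem.Dict.ofList source).get? key with
        | some text =>
            pvScanTokens best (PySem.Str.split₀ (PySem.Str.replace (PySem.Str.replace (PySem.Str.lower text) "," " ") "." " "))
        | none => best) best) 6 =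
    pvScanTokens 6 (([map_spec, location]).flatMap (fun source => pvBriefKeysA.flatMap (pvValToks source))) := by
  have hinner : ∀ (source : List (String × String)) (b : Int),
      (["layout_brief", "visual_brief", "style_brief", "description", "prompt", "brief", "theme"] : List String).foldl (fun best key =>
        match (PySem.Dict.ofList source).get? key with
        | some text =>
            pvScanTokens best (PySem.Str.split₀ (PySem.Str.replace (PySem.Str.replace (PySem.Str.lower text) "," " ") "." " "))
        | none => best) b = pvScanTokens b (pvBriefKeysA.flatMap (pvValToks source)) := by
    intro source b
    show pvBriefKeysA.foldl _ b = _
    induction pvBriefKeysA generalizing b with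
    | nil => simp [pvScanTokens]
    | cons k ks ih =>
      rw [List.flatMap_cons, pv_scan_append, List.foldl_cons, ih]
      unfold pvValToks
      cases (PySem.Dict.ofList source).get? k with
      | none => simp [pvScanTokens]
      | some text => rfl
  rw [List.foldl_cons, List.foldl_cons, List.foldl_nil, hinner, hinner,
    List.flatMap_cons, List.flatMap_cons, List.flatMap_nil, List.append_nil, pv_scan_append]

-- per-value tokens at the character level
lemma pv_expr_toks (w : String) :
    (PySem.Str.split₀ (PySem.Str.replace (PySem.Str.replace (PySem.Str.lower w) "," " ") "." " ")).map String.toList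
      = pvToks w.toList := by
  rw [PySem.Str.split₀_map_toList, PySem.Str.toList_replace, PySem.Str.toList_replace, PySem.Str.toList_lower]
  have hc1 : (",".toList) = [','] := by decide
  have hc2 : (".".toList) = ['.'] := by decide
  have hc3 : (" ".toList) = [' '] := by decide
  rw [hc1, hc2, hc3, pv_double_replace, pv_split₀_eq_pvW]
  unfold pvToks
  rw [PySem.Chars.lower, List.map_map]
  rfl

-- the token lists of A and B coincide
lemma pv_tokens_eq (location map_spec : List (String × String)) :
    PySem.Str.split₀ (PySem.Str.replace (PySem.Str.replace
        (PySem.Str.join " " (([map_spec, location]).flatMap (fun source => pvBriefKeysA.flatMap (pvPartOf source)))) "," " ") "." " ") =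
    ([map_spec, location]).flatMap (fun source => pvBriefKeysA.flatMap (pvValToks source)) := by
  have hinj : Function.Injective (String.toList) := by
    intro s t h
    have := congrArg String.ofList h
    simpa [String.ofList_toList] using this
  apply List.map_injective_iff.mpr hinj
  -- left side to the character level
  set parts := ([map_spec, location]).flatMap (fun source => pvBriefKeysA.flatMap (pvPartOf source)) with hparts
  have hL : (PySem.Str.split₀ (PySem.Str.replace (PySem.Str.replace (PySem.Str.join " " parts) "," " ") "." " ")).map String.toList
      = parts.flatMap (fun s => pvW [] (s.toList.map pvF)) := by
    rw [PySem.Str.split₀_map_toList, PySem.Str.toList_replace, PySem.Str.toList_replace]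
    have hjoin : (PySem.Str.join " " parts).toList = PySem.Chars.join [' '] (parts.map String.toList) := by
      rw [PySem.Str.join]
      have : (" ").toList = [' '] := by decide
      rw [String.toList_ofList, this]
    have hc1 : (",".toList) = [','] := by decide
    have hc2 : (".".toList) = ['.'] := by decide
    have hc3 : (" ".toList) = [' '] := by decide
    rw [hc1, hc2, hc3, hjoin, pv_double_replace, pv_split₀_eq_pvW, pv_toks_join, List.flatMap_map]
  rw [hL, hparts]
  -- both sides: flatMap over the same sources/keys; compare per retrieved value
  rw [pv_flatMap_flatMap, List.map_flatMap]
  refine pv_flatMap_congr _ _ _ (fun source _ => ?_)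
  rw [pv_flatMap_flatMap, List.map_flatMap]
  refine pv_flatMap_congr _ _ _ (fun k _ => ?_)
  unfold pvPartOf pvValToks
  cases hv : (PySem.Dict.ofList source).get? k with
  | none => simp
  | some v =>
    dsimp only
    by_cases h : PySem.Str.strip v ≠ ""
    · rw [if_pos h]
      simp only [List.flatMap_cons, List.flatMap_nil, List.append_nil]
      rw [pv_expr_toks]
      have hstrip : (PySem.Str.strip v).toList = PySem.Chars.strip v.toList := by
        rw [PySem.Str.strip, String.toList_ofList]
      have : (PySem.Str.lower (PySem.Str.strip v)).toList.map pvF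
          = (PySem.Chars.strip v.toList).map (fun c => pvF (PySem.Chars.lowerChar c)) := by
        rw [PySem.Str.toList_lower, hstrip]
        simp [PySem.Chars.lower, List.map_map, Function.comp]
      show pvW [] ((PySem.Str.lower (PySem.Str.strip v)).toList.map pvF) = pvToks v.toList
      rw [this]
      exact pv_toks_strip v.toList
    · rw [if_neg h]
      push Not at h
      have hnil : PySem.Chars.strip v.toList = [] := by
        have h2 : (PySem.Str.strip v).toList = ([] : List Char) := by rw [h]; decide
        rw [PySem.Str.strip, String.toList_ofList] at h2
        exact h2
      have hB : pvToks v.toList = [] := pv_toks_all_ws v.toList hnil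
      rw [List.flatMap_nil]
      have := pv_expr_toks v
      rw [hB] at this
      exact this.symm

-- correctness of the rank table against A's keyword sets
def pvGroups : List (List String) := [pvKws0, pvKws1, pvKws2, pvKws3, pvKws4, pvKws5]

def pvRankOf (t : String) : Int := pvRankTbl.getD t 6

set_option maxRecDepth 4096 in
lemma pvRank_of_mem (t : String) (k : Nat) (hk : k < 6) (h : t ∈ pvGroups.getD k []) :
    pvRankOf t = (k : Int) := by
  interval_cases k <;> fin_cases h <;> decide

set_option maxRecDepth 8192 in
set_option maxHeartbeats 2000000 in
lemma pvRank_complete (t : String) :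
    pvRankOf t = 6 ∨ (0 ≤ pvRankOf t ∧ pvRankOf t < 6 ∧ t ∈ pvGroups.getD (pvRankOf t).toNat []) := by
  by_cases hc : pvRankTbl.contains t = true
  · have hk : t ∈ pvRankTbl.keys := (PySem.Dict.contains_iff_mem_keys _ _).mp hc
    have hkeys : pvRankTbl.keys = pvKws0 ++ pvKws1 ++ pvKws2 ++ pvKws3 ++ pvKws4 ++ pvKws5 := by decide
    rw [hkeys] at hk
    fin_cases hk <;> right <;> refine ⟨by decide, by decide, ?_⟩ <;> decide
  · left
    have hc' : pvRankTbl.contains t = false := by simpa using hc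
    exact PySem.Dict.getD_of_not_contains _ _ hc'

lemma pv_foldl_min_le_init (l : List Int) : ∀ a : Int, l.foldl min a ≤ a := by
  induction l with
  | nil => intro a; simp
  | cons x xs ih => intro a; exact le_trans (ih (min a x)) (min_le_left a x)

lemma pv_foldl_min_le_mem (l : List Int) : ∀ a x : Int, x ∈ l → l.foldl min a ≤ x := by
  induction l with
  | nil => intro a x hx; simp at hx
  | cons y ys ih =>
    intro a x hx
    rcases List.mem_cons.mp hx with h | h
    · subst h; exact le_trans (pv_foldl_min_le_init ys (min a x)) (min_le_right a x)
    · exact ih (min a y) x h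

lemma pv_foldl_min_cases (l : List Int) : ∀ a : Int, l.foldl min a = a ∨ l.foldl min a ∈ l := by
  induction l with
  | nil => intro a; left; rfl
  | cons x xs ih =>
    intro a
    rcases ih (min a x) with h | h
    · simp only [List.foldl_cons, h]
      rcases min_choice a x with h' | h' <;> rw [h']
      · left; rfl
      · right; simp
    · right; exact List.mem_cons_of_mem _ h

lemma pv_inter_ne_iff (ts kws : List String) :
    PySem.Set.inter (PySem.Set.ofList ts) kws ≠ [] ↔ ∃ t ∈ ts, t ∈ kws := by
  rw [ne_eq, List.eq_nil_iff_forall_not_mem]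
  push Not
  constructor
  · rintro ⟨x, hx⟩
    have h := (PySem.Set.mem_inter _ _ _).mp hx
    exact ⟨x, (PySem.Set.mem_ofList _ _).mp h.1, h.2⟩
  · rintro ⟨t, ht, hk⟩
    exact ⟨t, (PySem.Set.mem_inter _ _ _).mpr ⟨(PySem.Set.mem_ofList _ _).mpr ht, hk⟩⟩

lemma pv_scan_eq_foldl_min (ts : List String) (init : Int) :
    pvScanTokens init ts = (ts.map pvRankOf).foldl min init := by
  rw [pvScanTokens, List.foldl_map]
  refine pv_foldl_congr _ _ _ _ (fun b t _ => ?_)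
  show (if pvRankTbl.getD t 6 < b then pvRankTbl.getD t 6 else b) = min b (pvRankOf t)
  unfold pvRankOf
  rcases lt_or_ge (pvRankTbl.getD t 6) b with h | h
  · rw [if_pos h, min_eq_right (le_of_lt h)]
  · rw [if_neg (not_lt.mpr h), min_eq_left h]

-- the priority selection: A's if-chain equals B's min-rank lookup on the same token list
lemma pv_select_eq (ts : List String) :
    (if PySem.Set.inter (PySem.Set.ofList ts) pvKws0 ≠ [] then "waterfront"
     else if PySem.Set.inter (PySem.Set.ofList ts) pvKws1 ≠ [] then "cliffside"
     else if PySem.Set.inter (PySem.Set.ofList ts) pvKws2 ≠ [] then "fortified"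
     else if PySem.Set.inter (PySem.Set.ofList ts) pvKws3 ≠ [] then "monastery"
     else if PySem.Set.inter (PySem.Set.ofList ts) pvKws4 ≠ [] then "forgeyard"
     else if PySem.Set.inter (PySem.Set.ofList ts) pvKws5 ≠ [] then "market"
     else "") =
    (if pvScanTokens 6 ts < 6 then PySem.List.pyGetD pvProfiles (pvScanTokens 6 ts) "" else "") := by
  set m : Int := pvScanTokens 6 ts with hmdef
  have hmfold : m = (ts.map pvRankOf).foldl min 6 := pv_scan_eq_foldl_min ts 6
  have hle : ∀ t ∈ ts, m ≤ pvRankOf t := by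
    intro t ht
    rw [hmfold]
    exact pv_foldl_min_le_mem _ _ _ (List.mem_map_of_mem ht)
  have noHit : ∀ k : Nat, k < 6 → (k : Int) < m →
      PySem.Set.inter (PySem.Set.ofList ts) (pvGroups.getD k []) = [] := by
    intro k hk6 hkm
    by_contra h
    rcases (pv_inter_ne_iff ts _).mp h with ⟨t, ht, hmem⟩
    have h1 := pvRank_of_mem t k hk6 hmem
    have h2 := hle t ht
    omega
  by_cases hm6 : m = 6
  · have e0 := noHit 0 (by norm_num) (by omega)
    have e1 := noHit 1 (by norm_num) (by omega)
    have e2 := noHit 2 (by norm_num) (by omega)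
    have e3 := noHit 3 (by norm_num) (by omega)
    have e4 := noHit 4 (by norm_num) (by omega)
    have e5 := noHit 5 (by norm_num) (by omega)
    rw [show pvGroups.getD 0 [] = pvKws0 from rfl] at e0
    rw [show pvGroups.getD 1 [] = pvKws1 from rfl] at e1
    rw [show pvGroups.getD 2 [] = pvKws2 from rfl] at e2
    rw [show pvGroups.getD 3 [] = pvKws3 from rfl] at e3
    rw [show pvGroups.getD 4 [] = pvKws4 from rfl] at e4
    rw [show pvGroups.getD 5 [] = pvKws5 from rfl] at e5
    rw [hm6]
    simp [e0, e1, e2, e3, e4, e5]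
  · have hex : ∃ t ∈ ts, pvRankOf t = m := by
      rcases pv_foldl_min_cases (ts.map pvRankOf) 6 with h | h
      · exact absurd (hmfold.trans h) hm6
      · rw [← hmfold] at h
        rcases List.mem_map.mp h with ⟨t, ht, he⟩
        exact ⟨t, ht, he⟩
    rcases hex with ⟨t, ht, hmt⟩
    rcases pvRank_complete t with h6 | ⟨hge, hlt, hmem⟩
    · exact absurd (hmt ▸ h6) hm6
    · rw [hmt] at hge hlt hmem
      have hne : PySem.Set.inter (PySem.Set.ofList ts) (pvGroups.getD m.toNat []) ≠ [] :=
        (pv_inter_ne_iff _ _).mpr ⟨t, ht, hmem⟩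
      interval_cases m
      · rw [if_pos (by simpa using hne)]; decide
      · have e0 := noHit 0 (by norm_num) (by norm_num)
        rw [if_neg (by simpa using e0), if_pos (by simpa using hne)]; decide
      · have e0 := noHit 0 (by norm_num) (by norm_num)
        have e1 := noHit 1 (by norm_num) (by norm_num)
        rw [if_neg (by simpa using e0), if_neg (by simpa using e1), if_pos (by simpa using hne)]
        decide
      · have e0 := noHit 0 (by norm_num) (by norm_num)
        have e1 := noHit 1 (by norm_num) (by norm_num)
        have e2 := noHit 2 (by norm_num) (by norm_num)
        rw [if_neg (by simpa using e0), if_neg (by simpa using e1), if_neg (by simpa using e2),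
          if_pos (by simpa using hne)]
        decide
      · have e0 := noHit 0 (by norm_num) (by norm_num)
        have e1 := noHit 1 (by norm_num) (by norm_num)
        have e2 := noHit 2 (by norm_num) (by norm_num)
        have e3 := noHit 3 (by norm_num) (by norm_num)
        rw [if_neg (by simpa using e0), if_neg (by simpa using e1), if_neg (by simpa using e2),
          if_neg (by simpa using e3), if_pos (by simpa using hne)]
        decide
      · have e0 := noHit 0 (by norm_num) (by norm_num)
        have e1 := noHit 1 (by norm_num) (by norm_num)
        have e2 := noHit 2 (by norm_num) (by norm_num)
        have e3 := noHit 3 (by norm_num) (by norm_num)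
        have e4 := noHit 4 (by norm_num) (by norm_num)
        rw [if_neg (by simpa using e0), if_neg (by simpa using e1), if_neg (by simpa using e2),
          if_neg (by simpa using e3), if_neg (by simpa using e4), if_pos (by simpa using hne)]
        decide

-- ===== VERDICT (by name: the statement is the Claim_ definition above) =====
theorem derive_site_profile_py_spec : Claim_equal_derive_site_profile_py := by
  intro location map_spec _
  unfold Spec_derive_site_profile_py derive_site_profile_py derive_site_profile_py_alt
  rw [pv_parts_flatMap, pv_best_flatMap]
  simp only [pv_tokens_eq]
  exact pv_select_eq _
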